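-- pv_equiv track=rewrite | github.com/Ashwanirawat1/mishra | Programs/String/TY_17.py | repeted
-- ===== SOURCE A (Python) =====
-- def repeted (string):
--     res = " "
--     for char in string:
--         if string.count(char) > 1:
--             res += "_"
--         else:
--             res += char
--     return res
-- ===== SOURCE B (Python) =====
-- def repeted(string):
--     freq = {}
--     for ch in string:
--         freq[ch] = freq.get(ch, 0) + 1
--     table = str.maketrans({ch: "_" for ch in string if freq[ch] > 1})
--     return " " + string.translate(table)
-- ===== Notes on version B (the rewrite author's own statement) =====
-- stated objective: faster
-- what changed: A rescans the whole string with string.count for every character (quadratic); B builds a frequency dict in one pass and then replaces repeated characters in a single bulk str.translate pass.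
import Mathlib
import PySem

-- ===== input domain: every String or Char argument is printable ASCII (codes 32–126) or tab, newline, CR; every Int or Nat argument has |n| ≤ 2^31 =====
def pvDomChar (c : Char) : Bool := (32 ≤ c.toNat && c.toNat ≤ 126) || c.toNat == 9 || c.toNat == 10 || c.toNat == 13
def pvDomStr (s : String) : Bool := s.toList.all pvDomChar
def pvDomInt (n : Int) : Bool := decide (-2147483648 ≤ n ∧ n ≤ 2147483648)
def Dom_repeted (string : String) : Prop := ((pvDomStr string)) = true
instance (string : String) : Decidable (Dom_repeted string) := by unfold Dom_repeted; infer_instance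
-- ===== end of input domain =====

-- B replaces A's per-character `string.count` rescan (quadratic) by one frequency-dict pass
-- plus a single bulk translate pass (objective: faster).

-- ===== PORT A =====
-- res is a Python str grown by '+='; ported as a List Char accumulator, String.ofList at the end.
def repeted (string : String) : String :=
  String.ofList (string.toList.foldl (fun res char =>
    if PySem.Str.count string (String.ofList [char]) > 1 then res ++ ['_'] else res ++ [char]) [' '])

-- ===== PORT B =====
-- str.translate is ported by hand as a per-character map: every value in the maketrans table
-- is "_", so translate replaces exactly the table's keys by '_' (exact on this table).
def repeted_alt (string : String) : String :=
  let cs := string.toList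
  let freq : PySem.Dict Char Int :=
    cs.foldl (fun d ch => d.insert ch (d.getD ch 0 + 1)) PySem.Dict.empty
  let table : PySem.Set Char := PySem.Set.ofList (cs.filter (fun ch => freq.getD ch 0 > 1))
  String.ofList (' ' :: cs.map (fun c => if table.contains c then '_' else c))

-- ===== PRECONDITION & SPEC =====
def Spec_repeted (string : String) (out : String) : Prop := out = repeted_alt string
instance (string : String) (out : String) : Decidable (Spec_repeted string out) := by unfold Spec_repeted; infer_instance

-- ===== CLAIM (what is proved, stated in full; the proofs are below) =====
def Claim_equal_repeted : Prop := ∀ (string : String), Dom_repeted string → Spec_repeted string (repeted string)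

-- ===== LEMMAS AND PROOFS =====

theorem count_go_singleton (c : Char) : ∀ (l : List Char) (fuel acc : Nat), l.length ≤ fuel →
    PySem.Chars.count.go [c] fuel l acc = acc + l.count c := by
  intro l
  induction l with
  | nil => intro fuel acc h; cases fuel <;> simp [PySem.Chars.count.go]
  | cons h t ih =>
    intro fuel acc hf
    cases fuel with
    | zero => simp at hf
    | succ f =>
      simp only [PySem.Chars.count.go]
      by_cases hc : h = c
      · subst hc
        simp [List.isPrefixOf, ih f (acc+1) (by simpa using hf), List.count_cons_self]
        omega
      · simp [List.isPrefixOf, hc, Ne.symm hc, ih f acc (by simpa using hf)]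

theorem count_singleton (s : List Char) (c : Char) :
    PySem.Chars.count s [c] = s.count c := by
  simp [PySem.Chars.count, count_go_singleton c s s.length 0 le_rfl]

-- ===== VERDICT (by name: the statement is the Claim_ definition above) =====
theorem repeted_spec : Claim_equal_repeted := by
  intro string _
  unfold Spec_repeted repeted repeted_alt
  have hfold := PySem.List.foldl_congr_mem string.toList
    (fun res char => if PySem.Str.count string (String.ofList [char]) > 1 then res ++ ['_'] else res ++ [char])
    (fun res char => res ++ [if PySem.Str.count string (String.ofList [char]) > 1 then '_' else char])
    [' '] (by intro acc x _; dsimp only; split_ifs <;> rfl)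
  rw [hfold, PySem.List.foldl_append_singleton_eq_map]
  refine congrArg String.ofList ?_
  rw [List.singleton_append]
  refine congrArg (' ' :: ·) ?_
  apply List.map_congr_left
  intro x hx
  have hcnt : PySem.Chars.count string.toList [x] = string.toList.count x := count_singleton _ _
  have hgetD : ∀ ch : Char, (List.foldl (fun d ch => d.insert ch (d.getD ch 0 + 1))
      (PySem.Dict.empty : PySem.Dict Char Int) string.toList).getD ch 0
      = (string.toList.count ch : Int) := by
    intro ch
    rw [PySem.Dict.getD_foldl_insert_add_one]
    simp
  by_cases h : 1 < string.toList.count x <;>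
    simp [PySem.Str.count_eq, hcnt, h, PySem.Set.contains, PySem.Set.mem_ofList,
      List.mem_filter, hx, hgetD]
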